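-- pv_equiv track=rewrite | github.com/rimirome/rimidi-kg | tools/auto_schema_diff.py | extract_relationship_entries
-- ===== SOURCE A (Python) =====
-- from typing import Dict, List
--
-- def extract_relationship_entries(text: str) -> Dict[str, str]:
--     blocks: dict[str, str] = {}
--     current_name: str | None = None
--     current_lines: list[str] = []
--     for line in text.splitlines():
--         stripped = line.strip()
--         if stripped.startswith("- type:"):
--             if current_name is not None:
--                 blocks[current_name] = "\n".join(current_lines).strip()
--                 current_lines = []
--             current_name = stripped.split(":", 1)[1].strip()
--         elif current_name is not None:
--             current_lines.append(line)
--     if current_name is not None: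
--         blocks[current_name] = "\n".join(current_lines).strip()
--     return blocks
-- ===== SOURCE B (Python) =====
-- def extract_relationship_entries(text):
--     lines = text.splitlines()
--
--     def name_of(line):
--         s = line.strip()
--         return s.split(":", 1)[1].strip() if s.startswith("- type:") else None
--
--     n = len(lines)
--     i = 0
--     while i < n and name_of(lines[i]) is None:
--         i += 1
--     pairs = []
--     while i < n:
--         j = i + 1
--         while j < n and name_of(lines[j]) is None:
--             j += 1
--         pairs.append((name_of(lines[i]), "\n".join(lines[i + 1:j]).strip()))
--         i = j
--     return dict(pairs)
-- ===== Notes on version B (the rewrite author's own statement) =====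
-- stated objective: alternative
-- what changed: A's single-pass state machine (mutable dict, Optional current_name, growing current_lines accumulator with a final flush) is replaced by a block-splitting decomposition: skip lines before the first header, then repeatedly slice the content up to the next header and build the dict once from the (name, block) pairs.
import Mathlib
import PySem

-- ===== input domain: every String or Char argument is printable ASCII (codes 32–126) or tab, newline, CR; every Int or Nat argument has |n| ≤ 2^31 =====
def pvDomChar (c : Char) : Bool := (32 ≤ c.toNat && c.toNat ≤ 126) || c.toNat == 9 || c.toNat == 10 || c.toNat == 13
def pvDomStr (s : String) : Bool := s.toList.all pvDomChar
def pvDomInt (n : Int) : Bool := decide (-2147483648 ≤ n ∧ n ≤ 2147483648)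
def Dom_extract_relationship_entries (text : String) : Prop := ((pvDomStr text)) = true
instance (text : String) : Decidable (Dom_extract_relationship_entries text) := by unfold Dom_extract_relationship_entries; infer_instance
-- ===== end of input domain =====

-- B replaces A's one-pass state machine (mutable dict, Optional current name, accumulator list)
-- by a block-splitting decomposition: skip to the first header, then repeatedly take the content
-- up to the next header and build the dict from the resulting (name, block) pairs. Objective: alternative.

-- ===== PORT A =====
-- name after "- type:": stripped.split(":", 1)[1].strip() — the index 1 always exists in the
-- branch where it is evaluated (stripped starts with "- type:", so ":" occurs), so pyGetD is exact there
def pvAName (stripped : String) : String :=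
  PySem.Str.strip (PySem.List.pyGetD ((PySem.Str.splitMax? stripped ":" 1).getD []) 1 "")

def pvAStep (st : PySem.Dict String String × Option String × List String) (line : String) :
    PySem.Dict String String × Option String × List String :=
  let stripped := PySem.Str.strip line
  if PySem.Str.startswith stripped "- type:" then
    let blocks :=
      match st.2.1 with
      | some n => st.1.insert n (PySem.Str.strip (PySem.Str.join "\n" st.2.2))
      | none => st.1
    (blocks, some (pvAName stripped), [])
  else
    match st.2.1 with
    | some _ => (st.1, st.2.1, st.2.2 ++ [line])
    | none => st

def pvAFlush (st : PySem.Dict String String × Option String × List String) :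
    PySem.Dict String String :=
  match st.2.1 with
  | some n => st.1.insert n (PySem.Str.strip (PySem.Str.join "\n" st.2.2))
  | none => st.1

def extract_relationship_entries (text : String) : List (String × String) :=
  ((PySem.Str.splitlines text).foldl pvAStep (PySem.Dict.empty, none, [])
    |> pvAFlush).items

-- ===== PORT B =====
def pvBIsHeader (l : String) : Bool :=
  PySem.Str.startswith (PySem.Str.strip l) "- type:"

def pvBName (l : String) : String :=
  PySem.Str.strip (PySem.List.pyGetD ((PySem.Str.splitMax? (PySem.Str.strip l) ":" 1).getD []) 1 "")

-- the outer while loop of Source B: first element is a header, content = lines up to the next header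
def pvBParse : List String → List (String × String)
  | [] => []
  | l :: ls =>
    (pvBName l, PySem.Str.strip (PySem.Str.join "\n" (ls.takeWhile (fun x => !pvBIsHeader x))))
      :: pvBParse (ls.dropWhile (fun x => !pvBIsHeader x))
termination_by ls => ls.length
decreasing_by exact Nat.lt_succ_of_le (ls.dropWhile_sublist _).length_le

def extract_relationship_entries_alt (text : String) : List (String × String) :=
  let lines := PySem.Str.splitlines text
  (PySem.Dict.ofList (pvBParse (lines.dropWhile (fun x => !pvBIsHeader x)))).items

-- ===== PRECONDITION & SPEC =====
def Spec_extract_relationship_entries (text : String) (out : List (String × String)) : Prop := out = extract_relationship_entries_alt text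
instance (text : String) (out : List (String × String)) : Decidable (Spec_extract_relationship_entries text out) := by unfold Spec_extract_relationship_entries; infer_instance

-- ===== CLAIM (what is proved, stated in full; the proofs are below) =====
def Claim_equal_extract_relationship_entries : Prop := ∀ (text : String), Dom_extract_relationship_entries text → Spec_extract_relationship_entries text (extract_relationship_entries text)

-- ===== LEMMAS AND PROOFS =====

-- inserting a list of pairs one by one
def pvInsAll (d : PySem.Dict String String) (ps : List (String × String)) :
    PySem.Dict String String :=
  ps.foldl (fun d p => d.insert p.1 p.2) d

theorem pvMain (ls : List String) (d : PySem.Dict String String) (n : String)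
    (acc : List String) :
    pvAFlush (ls.foldl pvAStep (d, some n, acc)) =
      pvInsAll d ((n, PySem.Str.strip (PySem.Str.join "\n"
          (acc ++ ls.takeWhile (fun x => !pvBIsHeader x))))
        :: pvBParse (ls.dropWhile (fun x => !pvBIsHeader x))) := by
  induction ls generalizing d n acc with
  | nil => simp [pvAFlush, pvInsAll, pvBParse]
  | cons l ls ih =>
    by_cases h : pvBIsHeader l = true
    · have hs : PySem.Str.startswith (PySem.Str.strip l) "- type:" = true := h
      simp only [List.foldl_cons, pvAStep, hs, if_true, List.takeWhile_cons,
        List.dropWhile_cons, h, Bool.not_true, Bool.false_eq_true, if_false]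
      rw [ih]
      simp [pvInsAll, pvBParse, pvAName, pvBName]
    · have hs : PySem.Str.startswith (PySem.Str.strip l) "- type:" = false :=
        by simpa [pvBIsHeader] using h
      simp only [List.foldl_cons, pvAStep, hs, Bool.false_eq_true, if_false,
        List.takeWhile_cons, List.dropWhile_cons, h, Bool.not_false, if_true]
      rw [ih]
      simp

theorem pvSkip (ls : List String) (d : PySem.Dict String String) :
    pvAFlush (ls.foldl pvAStep (d, none, [])) =
      pvInsAll d (pvBParse (ls.dropWhile (fun x => !pvBIsHeader x))) := by
  induction ls generalizing d with
  | nil => simp [pvAFlush, pvInsAll, pvBParse]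
  | cons l ls ih =>
    by_cases h : pvBIsHeader l = true
    · have hs : PySem.Str.startswith (PySem.Str.strip l) "- type:" = true := h
      simp only [List.foldl_cons, pvAStep, hs, if_true, List.dropWhile_cons, h,
        Bool.not_true, Bool.false_eq_true, if_false]
      rw [pvMain]
      simp [pvBParse, pvInsAll, pvAName, pvBName]
    · have hs : PySem.Str.startswith (PySem.Str.strip l) "- type:" = false :=
        by simpa [pvBIsHeader] using h
      simp only [List.foldl_cons, pvAStep, hs, Bool.false_eq_true, if_false,
        List.dropWhile_cons, h, Bool.not_false, if_true]
      exact ih d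

-- ===== VERDICT (by name: the statement is the Claim_ definition above) =====
theorem extract_relationship_entries_spec : Claim_equal_extract_relationship_entries := by
  intro text _
  show _ = _
  unfold extract_relationship_entries extract_relationship_entries_alt
  rw [pvSkip]
  rfl
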